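-- pv_equiv track=rewrite | github.com/pjessesco/print2d | print2d/__init__.py | _generate_main_line
-- ===== SOURCE A (Python) =====
-- def _extract_substring_height(string, height):
--     h = 0
--     end = 0
--     if string.count("\n") < height:
--         return " " * (string.find("\n") + 1)
--
--     for i in range(len(string)):
--         if string[i] == '\n':
--             start = end
--             end = i + 1
--             if height == h:
--                 return string[start:end - 1] + " "
--             h += 1
--     return string[end:]
--
-- def _generate_main_line(height, str_list, h_list):
--     result = ""
--     for i in range(len(str_list)):
--         if h_list[i] == 1:
--             result += str_list[i] + " "
--         else:
--             result += _extract_substring_height(str_list[i], height) + " "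
--     return result
-- ===== SOURCE B (Python) =====
-- def _extract_substring_height(string, height):
--     lines = string.split("\n")
--     if height >= len(lines):
--         return " " * (string.find("\n") + 1)
--     if 0 <= height < len(lines) - 1:
--         return lines[height] + " "
--     return lines[-1]
--
-- def _generate_main_line(height, str_list, h_list):
--     return "".join(
--         (s if h == 1 else _extract_substring_height(s, height)) + " "
--         for s, h in zip(str_list, h_list)
--     )
-- ===== Notes on version B (the rewrite author's own statement) =====
-- stated objective: simpler
-- what changed: Replaces the character-by-character newline scan with absolute indices and slicing by a single split('\n') into a list of lines indexed by height, and replaces the index-driven accumulator loop over range(len(str_list)) with a join over zip(str_list, h_list).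
import Mathlib
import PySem

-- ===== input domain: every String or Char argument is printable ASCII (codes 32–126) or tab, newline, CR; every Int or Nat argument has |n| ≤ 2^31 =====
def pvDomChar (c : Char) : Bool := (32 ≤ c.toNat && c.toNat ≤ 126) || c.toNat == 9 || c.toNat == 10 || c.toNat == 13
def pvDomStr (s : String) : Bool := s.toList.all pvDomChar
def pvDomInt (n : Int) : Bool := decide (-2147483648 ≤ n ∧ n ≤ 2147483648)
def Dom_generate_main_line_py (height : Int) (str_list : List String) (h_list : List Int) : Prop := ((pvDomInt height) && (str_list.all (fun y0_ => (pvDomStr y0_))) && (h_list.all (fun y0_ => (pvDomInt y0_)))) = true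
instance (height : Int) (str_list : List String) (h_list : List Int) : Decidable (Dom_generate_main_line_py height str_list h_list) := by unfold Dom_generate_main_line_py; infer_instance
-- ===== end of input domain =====

-- B replaces A's character-by-character newline scan by a single split into lines indexed by
-- height, and A's index-driven accumulator loop by a join over zip (objective: simpler).


-- ===== PORT A =====
-- the 'for i in range(len(string))' loop of _extract_substring_height, with its state h, end
def pvExtractLoopA (cs : List Char) (height : Int) (i : Nat) (h : Int) (en : Nat) : List Char :=
  if hi : i < cs.length then
    if cs[i] = '\n' then
      if height = h then
        PySem.List.slice cs (some (en : Int)) (some (((i : Int) + 1) - 1)) ++ [' ']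
      else pvExtractLoopA cs height (i + 1) (h + 1) (i + 1)
    else pvExtractLoopA cs height (i + 1) h en
  else cs.drop en
termination_by cs.length - i

-- _extract_substring_height (on the string's character list)
def pvExtractA (cs : List Char) (height : Int) : List Char :=
  if (PySem.Chars.count cs ['\n'] : Int) < height then
    List.replicate (PySem.Chars.find cs ['\n'] + 1).toNat ' '
  else pvExtractLoopA cs height 0 0 0

def generate_main_line_py (height : Int) (str_list : List String) (h_list : List Int) : String :=
  String.mk ((PySem.List.pyRange 0 (str_list.length : Int) 1).foldl (fun res i =>
    if PySem.List.pyGetD h_list i 0 = 1 then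
      res ++ ((PySem.List.pyGetD str_list i "").toList ++ [' '])
    else
      res ++ (pvExtractA (PySem.List.pyGetD str_list i "").toList height ++ [' '])) [])

-- ===== PORT B =====
-- _extract_substring_height of Source B: split into lines once, index by height
def pvExtractB (cs : List Char) (height : Int) : List Char :=
  let lines := PySem.Chars.splitOn cs ['\n']
  if (lines.length : Int) ≤ height then
    List.replicate (PySem.Chars.find cs ['\n'] + 1).toNat ' '
  else if 0 ≤ height ∧ height < (lines.length : Int) - 1 then
    PySem.List.pyGetD lines height [] ++ [' ']
  else PySem.List.pyGetD lines (-1) []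

def generate_main_line_py_alt (height : Int) (str_list : List String) (h_list : List Int) : String :=
  String.mk (((str_list.zip h_list).map (fun p =>
    (if p.2 = 1 then p.1.toList else pvExtractB p.1.toList height) ++ [' '])).flatten)

-- ===== PRECONDITION & SPEC =====
-- A indexes h_list[i] for every i < len(str_list): it raises IndexError iff h_list is shorter.
def Pre_generate_main_line_py (height : Int) (str_list : List String) (h_list : List Int) : Prop :=
  str_list.length ≤ h_list.length
instance (height : Int) (str_list : List String) (h_list : List Int) : Decidable (Pre_generate_main_line_py height str_list h_list) := by unfold Pre_generate_main_line_py; infer_instance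

def pvWitness_generate_main_line_py : Int × List String × List Int := (0, ["a\nb"], [2])

def Spec_generate_main_line_py (height : Int) (str_list : List String) (h_list : List Int) (out : String) : Prop := out = generate_main_line_py_alt height str_list h_list
instance (height : Int) (str_list : List String) (h_list : List Int) (out : String) : Decidable (Spec_generate_main_line_py height str_list h_list out) := by unfold Spec_generate_main_line_py; infer_instance

-- ===== CLAIM (what is proved, stated in full; the proofs are below) =====
def Claim_equal_generate_main_line_py : Prop := ∀ (height : Int) (str_list : List String) (h_list : List Int), Dom_generate_main_line_py height str_list h_list → Pre_generate_main_line_py height str_list h_list → Spec_generate_main_line_py height str_list h_list (generate_main_line_py height str_list h_list)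

-- ===== LEMMAS AND PROOFS =====

-- reference splitting of a character list at '\n' (what both sides are related to)
def pvLines : List Char → List (List Char)
  | [] => [[]]
  | c :: rest =>
      if c = '\n' then [] :: pvLines rest
      else
        match pvLines rest with
        | [] => [[c]]
        | l :: ls => (c :: l) :: ls

theorem pvLines_ne_nil (cs : List Char) : pvLines cs ≠ [] := by
  induction cs with
  | nil => simp [pvLines]
  | cons c rest ih =>
      simp only [pvLines]
      split
      · simp
      · cases h : pvLines rest <;> simp

theorem pvLines_no_newline {cs : List Char} (h : '\n' ∉ cs) : pvLines cs = [cs] := by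
  induction cs with
  | nil => rfl
  | cons c rest ih =>
      simp only [List.mem_cons, not_or] at h
      simp only [pvLines, if_neg (Ne.symm h.1), ih h.2]

theorem pvLines_append {p : List Char} (rest : List Char) (h : '\n' ∉ p) :
    pvLines (p ++ '\n' :: rest) = p :: pvLines rest := by
  induction p with
  | nil => simp [pvLines]
  | cons c q ih =>
      simp only [List.mem_cons, not_or] at h
      simp only [List.cons_append, pvLines, if_neg (Ne.symm h.1), ih h.2]

-- count.go with a single-character separator counts occurrences
theorem pvCountGo (cs : List Char) : ∀ (fuel acc : Nat), cs.length ≤ fuel →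
    PySem.Chars.count.go ['\n'] fuel cs acc = acc + cs.count '\n' := by
  induction cs with
  | nil => intro fuel acc _; cases fuel <;> simp [PySem.Chars.count.go]
  | cons c rest ih =>
      intro fuel acc hf
      cases fuel with
      | zero => simp at hf
      | succ f =>
          simp only [List.length_cons] at hf
          by_cases hc : c = '\n'
          · subst hc
            simp [PySem.Chars.count.go, List.isPrefixOf, ih f (acc + 1) (by omega),
              List.count_cons]
            omega
          · have hpre : ¬ (['\n'].isPrefixOf (c :: rest)) := by
              simp [List.isPrefixOf]; exact fun h => hc h.symm
            simp [PySem.Chars.count.go, hpre, ih f acc (by omega), List.count_cons, hc]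

theorem pvLines_length (cs : List Char) : (pvLines cs).length = cs.count '\n' + 1 := by
  induction cs with
  | nil => rfl
  | cons c rest ih =>
      by_cases hc : c = '\n'
      · subst hc; simp [pvLines, ih, List.count_cons]
      · have hne := pvLines_ne_nil rest
        simp only [pvLines, if_neg (Ne.symm (by exact fun h => hc h.symm))]
        cases h : pvLines rest with
        | nil => exact absurd h hne
        | cons l ls =>
            simp only [List.length_cons]
            rw [h] at ih
            simp only [List.length_cons] at ih
            simp [List.count_cons, hc, ih]

theorem pvCount_eq (cs : List Char) :
    (PySem.Chars.count cs ['\n'] : Int) = ((pvLines cs).length : Int) - 1 := by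
  have h1 : PySem.Chars.count cs ['\n'] = cs.count '\n' := by
    simpa [PySem.Chars.count] using pvCountGo cs cs.length 0 le_rfl
  rw [h1, pvLines_length]; push_cast; ring

-- splitOn.go with a single-character separator computes pvLines
theorem pvSplitOnGo (cs : List Char) : ∀ (fuel : Nat) (cur : List Char) (acc : List (List Char)),
    cs.length ≤ fuel →
    PySem.Chars.splitOn.go ['\n'] fuel cs cur acc
      = acc.reverse ++ (match pvLines cs with
                        | [] => []
                        | l :: ls => (cur.reverse ++ l) :: ls) := by
  induction cs with
  | nil => intro fuel cur acc _; cases fuel <;> simp [PySem.Chars.splitOn.go, pvLines]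
  | cons c rest ih =>
      intro fuel cur acc hf
      cases fuel with
      | zero => simp at hf
      | succ f =>
          simp only [List.length_cons] at hf
          by_cases hc : c = '\n'
          · subst hc
            have hpre : (['\n'].isPrefixOf ('\n' :: rest)) = true := by
              simp [List.isPrefixOf]
            simp only [PySem.Chars.splitOn.go, hpre, if_true]
            have hdrop : List.drop (['\n'].length) ('\n' :: rest) = rest := rfl
            rw [hdrop, ih f [] (cur.reverse :: acc) (by omega)]
            cases h : pvLines rest with
            | nil => exact absurd h (pvLines_ne_nil rest)
            | cons l ls => simp [pvLines, h]
          · have hpre : (['\n'].isPrefixOf (c :: rest)) = false := by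
              simp [List.isPrefixOf]; exact fun h => hc h.symm
            simp only [PySem.Chars.splitOn.go, hpre, Bool.false_eq_true, if_false]
            rw [ih f (c :: cur) acc (by omega)]
            cases h : pvLines rest with
            | nil => exact absurd h (pvLines_ne_nil rest)
            | cons l ls =>
                simp [pvLines, if_neg (Ne.symm (by exact fun h => hc h.symm)), h]

theorem pvSplitOn_eq (cs : List Char) : PySem.Chars.splitOn cs ['\n'] = pvLines cs := by
  rw [PySem.Chars.splitOn, pvSplitOnGo cs (cs.length + 1) [] [] (by omega)]
  cases h : pvLines cs with
  | nil => exact absurd h (pvLines_ne_nil cs)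
  | cons l ls => simp

-- what A's scan loop computes, phrased on pvLines
def pvSpec (l : List Char) (height h : Int) : List Char :=
  if h ≤ height ∧ height < h + ((pvLines l).length : Int) - 1 then
    (pvLines l).getD (height - h).toNat [] ++ [' ']
  else (pvLines l).getLastD []

theorem pvExtractLoopA_done (cs : List Char) (height h : Int) (en : Nat)
    (hno : '\n' ∉ cs.drop en) :
    pvExtractLoopA cs height cs.length h en = pvSpec (cs.drop en) height h := by
  rw [pvExtractLoopA]
  simp only [lt_irrefl, dite_false]
  simp [pvSpec, pvLines_no_newline hno]

theorem pvExtractLoopA_eq (cs : List Char) (height : Int) :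
    ∀ (k i : Nat) (h : Int) (en : Nat), i ≤ cs.length → en ≤ i →
    cs.length - i ≤ k →
    '\n' ∉ (cs.drop en).take (i - en) →
    pvExtractLoopA cs height i h en = pvSpec (cs.drop en) height h := by
  intro k
  induction k with
  | zero =>
      intro i h en hi hen hk hno
      have hieq : i = cs.length := by omega
      subst hieq
      have htake : (cs.drop en).take (cs.length - en) = cs.drop en := by
        apply List.take_of_length_le; simp
      rw [htake] at hno
      exact pvExtractLoopA_done cs height h en hno
  | succ k ih =>
      intro i h en hi hen hk hno
      by_cases hlt : i < cs.length
      · rw [pvExtractLoopA]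
        rw [dif_pos hlt]
        have hdecomp : cs.drop en = (cs.drop en).take (i - en) ++ cs[i] :: cs.drop (i + 1) := by
          conv_lhs => rw [← List.take_append_drop (i - en) (cs.drop en)]
          congr 1
          rw [List.drop_drop]
          have : en + (i - en) = i := by omega
          rw [this]
          exact (List.drop_eq_getElem_cons hlt)
        by_cases hc : cs[i] = '\n'
        · rw [if_pos hc]
          rw [hc] at hdecomp
          have hlines : pvLines (cs.drop en) =
              (cs.drop en).take (i - en) :: pvLines (cs.drop (i + 1)) := by
            conv_lhs => rw [hdecomp]
            exact pvLines_append _ hno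
          by_cases hh : height = h
          · rw [if_pos hh]
            have hslice : PySem.List.slice cs (some (en : Int)) (some (((i : Int) + 1) - 1))
                = (cs.drop en).take (i - en) := by
              have : ((i : Int) + 1) - 1 = ((i : Nat) : Int) := by push_cast; ring
              rw [this, PySem.List.slice_natCast]
            rw [hslice, pvSpec, hlines]
            have hlen : 0 < (pvLines (cs.drop (i + 1))).length :=
              List.length_pos_iff.mpr (pvLines_ne_nil _)
            rw [if_pos (by constructor <;> [omega; (simp only [List.length_cons]; push_cast; omega)])]
            have : (height - h).toNat = 0 := by omega
            simp [this]
          · rw [if_neg hh]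
            rw [ih (i + 1) (h + 1) (i + 1) (by omega) (by omega) (by omega) (by simp)]
            rw [pvSpec, pvSpec, hlines]
            have hLnil := pvLines_ne_nil (cs.drop (i + 1))
            have hlen : 0 < (pvLines (cs.drop (i + 1))).length :=
              List.length_pos_iff.mpr hLnil
            by_cases hcond : h + 1 ≤ height ∧ height < h + 1 + ((pvLines (cs.drop (i+1))).length : Int) - 1
            · rw [if_pos hcond]
              rw [if_pos (by constructor <;> [omega; (simp only [List.length_cons]; push_cast; omega)])]
              have : (height - h).toNat = (height - (h + 1)).toNat + 1 := by omega
              simp [this]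
            · rw [if_neg hcond]
              rw [if_neg (by
                intro hcon
                simp only [List.length_cons] at hcon
                apply hcond
                constructor <;> [omega; (push_cast at hcon ⊢; omega)])]
              rw [List.getLastD_cons, List.getLastD_eq_getLast?, List.getLastD_eq_getLast?,
                List.getLast?_eq_some_getLast hLnil]
              simp
        · rw [if_neg hc]
          refine ih (i + 1) h en (by omega) (by omega) (by omega) ?_
          have : (cs.drop en).take (i + 1 - en) = (cs.drop en).take (i - en) ++ [cs[i]] := by
            have h1 : i + 1 - en = (i - en) + 1 := by omega
            rw [h1]
            rw [List.take_succ]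
            congr 1
            have h2 : (cs.drop en)[i - en]? = some cs[i] := by
              rw [List.getElem?_drop]
              have : en + (i - en) = i := by omega
              rw [this]
              exact List.getElem?_eq_getElem hlt
            simp [h2]
          rw [this]
          simp only [List.mem_append, List.mem_singleton, not_or]
          exact ⟨hno, fun hx => hc hx.symm⟩
      · have hieq : i = cs.length := by omega
        subst hieq
        have htake : (cs.drop en).take (cs.length - en) = cs.drop en := by
          apply List.take_of_length_le; simp
        rw [htake] at hno
        exact pvExtractLoopA_done cs height h en hno

-- the two helpers agree
theorem pvExtract_eq (cs : List Char) (height : Int) :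
    pvExtractA cs height = pvExtractB cs height := by
  rw [pvExtractA, pvExtractB]
  simp only [pvSplitOn_eq, pvCount_eq]
  have hnil := pvLines_ne_nil cs
  have hlen : 0 < (pvLines cs).length := List.length_pos_iff.mpr hnil
  by_cases hbig : ((pvLines cs).length : Int) - 1 < height
  · rw [if_pos hbig, if_pos (by omega)]
  · rw [if_neg hbig, if_neg (by omega)]
    rw [pvExtractLoopA_eq cs height cs.length 0 0 0 (by omega) (by omega) (by omega) (by simp)]
    rw [pvSpec]
    simp only [List.drop_zero]
    by_cases hcond : 0 ≤ height ∧ height < 0 + ((pvLines cs).length : Int) - 1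
    · rw [if_pos hcond, if_pos (by omega)]
      rw [PySem.List.pyGetD_eq_getElem (pvLines cs) [] (by omega) (by push_cast; omega)]
      have : height - 0 = height := by ring
      rw [this]
      rw [List.getD_eq_getElem?_getD, List.getElem?_eq_getElem (by omega)]
      simp
    · rw [if_neg hcond, if_neg (by omega)]
      rw [PySem.List.pyGetD_neg_one (pvLines cs) [] hnil]
      rw [List.getLastD_eq_getLast?, List.getLast?_eq_some_getLast hnil]
      simp

-- index loop over range(len) = flatMap over zip, when h_list is long enough
theorem pvRangeZip {α β γ : Type} (F : α → β → List γ) (da : α) (db : β) :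
    ∀ (a : List α) (b : List β), a.length ≤ b.length →
    (List.range a.length).flatMap (fun k => F (a.getD k da) (b.getD k db))
      = (a.zip b).flatMap (fun p => F p.1 p.2) := by
  intro a
  induction a with
  | nil => intro b _; simp
  | cons x a' ih =>
      intro b hb
      cases b with
      | nil => simp at hb
      | cons y b' =>
          simp only [List.length_cons, List.range_succ_eq_map, List.flatMap_cons,
            List.flatMap_map, List.getD_cons_zero, List.getD_cons_succ, List.zip_cons_cons]
          congr 1
          exact ih b' (by simpa using hb)

-- ===== VERDICT (by name: the statement is the Claim_ definition above) =====
theorem generate_main_line_py_spec : Claim_equal_generate_main_line_py := by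
  intro height str_list h_list _ hpre
  unfold Spec_generate_main_line_py generate_main_line_py generate_main_line_py_alt
  congr 1
  have hbody : ∀ (res : List Char), ∀ i ∈ PySem.List.pyRange 0 (str_list.length : Int) 1,
      (if PySem.List.pyGetD h_list i 0 = 1 then
        res ++ ((PySem.List.pyGetD str_list i "").toList ++ [' '])
      else
        res ++ (pvExtractA (PySem.List.pyGetD str_list i "").toList height ++ [' ']))
      = res ++ ((if PySem.List.pyGetD h_list i 0 = 1 then
            (PySem.List.pyGetD str_list i "").toList
          else pvExtractB (PySem.List.pyGetD str_list i "").toList height) ++ [' ']) := by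
    intro res i _
    by_cases h : PySem.List.pyGetD h_list i 0 = 1
    · simp [h]
    · simp [h, pvExtract_eq]
  rw [PySem.List.foldl_congr_mem _ _ _ _ hbody]
  rw [PySem.List.foldl_append_eq_flatMap]
  rw [List.nil_append]
  rw [PySem.List.pyRange_zero_natCast, List.flatMap_map]
  have hcast : ∀ (k : Nat),
      (fun k : Nat => (if PySem.List.pyGetD h_list (k : Int) 0 = 1 then
            (PySem.List.pyGetD str_list (k : Int) "").toList
          else pvExtractB (PySem.List.pyGetD str_list (k : Int) "").toList height) ++ [' ']) k
      = (fun k : Nat => (if h_list.getD k 0 = 1 then (str_list.getD k "").toList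
          else pvExtractB (str_list.getD k "").toList height) ++ [' ']) k := by
    intro k; simp [PySem.List.pyGetD_natCast]
  rw [funext hcast]
  rw [pvRangeZip (fun s h => (if h = 1 then s.toList else pvExtractB s.toList height) ++ [' '])
      "" 0 str_list h_list hpre]
  rw [List.flatMap_def]
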